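-- pv_equiv track=rewrite | github.com/marieboes/Advent-of-Code-2024 | day_8_part_1.py | modify_grid_with_hashes
-- ===== SOURCE A (Python) =====
-- def modify_grid_with_hashes(grid, distances):
--     for distance_list in distances.values():
--         for (loc_a, loc_b, (down, right)) in distance_list:
--             # Calculate negative and positive positions
--             negative_pos = (loc_a[0] - down, loc_a[1] - right)
--             positive_pos = (loc_b[0] + down, loc_b[1] + right)
--
--             # Mark '#' on negative step position if within grid
--             if 0 <= negative_pos[0] < len(grid) and 0 <= negative_pos[1] < len(grid[0]):
--                 grid[negative_pos[0]][negative_pos[1]] = '#'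
--
--             # Mark '#' on positive step position if within grid
--             if 0 <= positive_pos[0] < len(grid) and 0 <= positive_pos[1] < len(grid[0]):
--                 grid[positive_pos[0]][positive_pos[1]] = '#'
--
--     # Count unique '#' hashes from the modified grid
--     num_hashes_added = sum(row.count('#') for row in grid)
--     return num_hashes_added, grid
-- ===== SOURCE B (Python) =====
-- def modify_grid_with_hashes(grid, distances):
--     h = len(grid)
--     w = len(grid[0]) if grid else 0
--     targets = set()
--     for distance_list in distances.values():
--         for loc_a, loc_b, (down, right) in distance_list:
--             for r, c in ((loc_a[0] - down, loc_a[1] - right),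
--                          (loc_b[0] + down, loc_b[1] + right)):
--                 if 0 <= r < h and 0 <= c < w:
--                     targets.add((r, c))
--     new_grid = [["#" if (r, c) in targets else cell
--                  for c, cell in enumerate(row)]
--                 for r, row in enumerate(grid)]
--     num_hashes = sum(cell == "#" for row in new_grid for cell in row)
--     return num_hashes, new_grid
-- ===== Notes on version B (the rewrite author's own statement) =====
-- stated objective: alternative
-- what changed: B first collects the set of in-bounds antinode positions, then builds a fresh grid in one comprehension pass replacing those cells with '#' while counting '#' cells, instead of A's in-place cell-by-cell mutation followed by a separate full rescan; B returns a new grid rather than mutating the argument (return value identical).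
import Mathlib
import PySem

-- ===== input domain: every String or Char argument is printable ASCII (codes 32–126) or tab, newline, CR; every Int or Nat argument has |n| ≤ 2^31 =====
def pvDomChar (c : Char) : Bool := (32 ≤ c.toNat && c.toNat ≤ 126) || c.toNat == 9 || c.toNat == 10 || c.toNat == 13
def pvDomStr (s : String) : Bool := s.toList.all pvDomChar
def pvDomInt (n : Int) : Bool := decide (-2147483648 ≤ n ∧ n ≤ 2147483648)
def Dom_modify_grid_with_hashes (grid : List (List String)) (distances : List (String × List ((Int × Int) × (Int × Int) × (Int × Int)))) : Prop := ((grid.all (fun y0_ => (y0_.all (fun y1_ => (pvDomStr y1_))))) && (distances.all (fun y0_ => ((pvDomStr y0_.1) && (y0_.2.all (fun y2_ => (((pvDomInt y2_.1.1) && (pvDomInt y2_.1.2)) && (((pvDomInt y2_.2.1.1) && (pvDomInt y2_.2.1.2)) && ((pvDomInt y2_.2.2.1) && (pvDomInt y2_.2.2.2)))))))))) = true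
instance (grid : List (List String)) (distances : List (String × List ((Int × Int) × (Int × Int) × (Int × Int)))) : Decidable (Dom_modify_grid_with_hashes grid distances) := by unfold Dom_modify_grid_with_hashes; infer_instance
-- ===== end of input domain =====

-- B collects the set of in-bounds antinode positions first, then rebuilds the grid in one
-- comprehension pass (counting '#') instead of A's in-place mutation plus a final rescan;
-- A mutates its grid argument in place, B does not — the equivalence proved is about the return value.

-- ===== PORT A =====
-- grid[r][c] = '#' ; exact for 0 ≤ r < len(grid) and 0 ≤ c < len(grid[r]) (Pre_ excludes the
-- short-row case, on which Python raises IndexError).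
def pvSetHash (g : List (List String)) (r c : Int) : List (List String) :=
  g.modify r.toNat (fun row => row.set c.toNat "#")

-- one iteration of A's inner loop body (the two conditional markings)
def pvMarkA (g : List (List String)) (e : (Int × Int) × (Int × Int) × (Int × Int)) : List (List String) :=
  let negp : Int × Int := (e.1.1 - e.2.2.1, e.1.2 - e.2.2.2)
  let posp : Int × Int := (e.2.1.1 + e.2.2.1, e.2.1.2 + e.2.2.2)
  let g1 := if 0 ≤ negp.1 ∧ negp.1 < (g.length : Int) ∧ 0 ≤ negp.2 ∧ negp.2 < ((g.headD []).length : Int)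
            then pvSetHash g negp.1 negp.2 else g
  if 0 ≤ posp.1 ∧ posp.1 < (g1.length : Int) ∧ 0 ≤ posp.2 ∧ posp.2 < ((g1.headD []).length : Int)
  then pvSetHash g1 posp.1 posp.2 else g1

def modify_grid_with_hashes (grid : List (List String)) (distances : List (String × List ((Int × Int) × (Int × Int) × (Int × Int)))) : Int × List (List String) :=
  let g := distances.foldl (fun g kv => kv.2.foldl pvMarkA g) grid
  (g.foldl (fun s row => s + (PySem.List.count row "#" : Int)) 0, g)

-- ===== PORT B =====
def pvInb (h w : Int) (p : Int × Int) : Bool :=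
  decide (0 ≤ p.1) && decide (p.1 < h) && decide (0 ≤ p.2) && decide (p.2 < w)

def pvTargets (h w : Int) (distances : List (String × List ((Int × Int) × (Int × Int) × (Int × Int)))) : PySem.Set (Int × Int) :=
  distances.foldl (fun s kv => kv.2.foldl (fun s e =>
    [(e.1.1 - e.2.2.1, e.1.2 - e.2.2.2), (e.2.1.1 + e.2.2.1, e.2.1.2 + e.2.2.2)].foldl
      (fun s p => if pvInb h w p then PySem.Set.add s p else s) s) s) PySem.Set.empty

def pvApplyMask (g : List (List String)) (s : PySem.Set (Int × Int)) : List (List String) :=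
  (PySem.List.enumerate g 0).map (fun rrow =>
    (PySem.List.enumerate rrow.2 0).map (fun ccell =>
      if PySem.Set.contains s (rrow.1, ccell.1) then "#" else ccell.2))

def modify_grid_with_hashes_alt (grid : List (List String)) (distances : List (String × List ((Int × Int) × (Int × Int) × (Int × Int)))) : Int × List (List String) :=
  let h : Int := (grid.length : Int)
  let w : Int := ((grid.headD []).length : Int)  -- len(grid[0]) if grid else 0
  let ng := pvApplyMask grid (pvTargets h w distances)
  (ng.foldl (fun acc row => row.foldl (fun a cell => if cell == "#" then a + 1 else a) acc) 0, ng)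

-- ===== PRECONDITION & SPEC =====
-- Pre_ excludes exactly the inputs on which Python A raises IndexError: some antinode position
-- lands inside the (len(grid) × len(grid[0])) box but in a ragged row shorter than grid[0].
def Pre_modify_grid_with_hashes (grid : List (List String)) (distances : List (String × List ((Int × Int) × (Int × Int) × (Int × Int)))) : Prop :=
  ∀ kv ∈ distances, ∀ e ∈ kv.2,
    ∀ p ∈ [((e.1.1 - e.2.2.1 : Int), (e.1.2 - e.2.2.2 : Int)), (e.2.1.1 + e.2.2.1, e.2.1.2 + e.2.2.2)],
      0 ≤ p.1 → p.1 < (grid.length : Int) → 0 ≤ p.2 → p.2 < ((grid.headD []).length : Int) →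
        p.2 < ((grid.getD p.1.toNat []).length : Int)
instance (grid : List (List String)) (distances : List (String × List ((Int × Int) × (Int × Int) × (Int × Int)))) : Decidable (Pre_modify_grid_with_hashes grid distances) := by unfold Pre_modify_grid_with_hashes; infer_instance

def pvWitness_modify_grid_with_hashes : List (List String) × (List (String × List ((Int × Int) × (Int × Int) × (Int × Int)))) :=
  ([["a", "b"], ["c", "d"]], [("A", [((0, 0), (1, 1), (1, 1))])])

def Spec_modify_grid_with_hashes (grid : List (List String)) (distances : List (String × List ((Int × Int) × (Int × Int) × (Int × Int)))) (out : Int × List (List String)) : Prop := out = modify_grid_with_hashes_alt grid distances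
instance (grid : List (List String)) (distances : List (String × List ((Int × Int) × (Int × Int) × (Int × Int)))) (out : Int × List (List String)) : Decidable (Spec_modify_grid_with_hashes grid distances out) := by unfold Spec_modify_grid_with_hashes; infer_instance

-- ===== CLAIM (what is proved, stated in full; the proofs are below) =====
def Claim_equal_modify_grid_with_hashes : Prop := ∀ (grid : List (List String)) (distances : List (String × List ((Int × Int) × (Int × Int) × (Int × Int)))), Dom_modify_grid_with_hashes grid distances → Pre_modify_grid_with_hashes grid distances → Spec_modify_grid_with_hashes grid distances (modify_grid_with_hashes grid distances)
-- ===== LEMMAS AND PROOFS =====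

theorem pvApplyMask_length (g : List (List String)) (s : PySem.Set (Int × Int)) :
    (pvApplyMask g s).length = g.length := by
  simp [pvApplyMask, PySem.List.length_enumerate]

theorem pvApplyMask_getElem (g : List (List String)) (s : PySem.Set (Int × Int))
    (i : Nat) (hi : i < g.length) :
    (pvApplyMask g s)[i]'(by simpa [pvApplyMask_length] using hi) =
      (PySem.List.enumerate g[i] 0).map (fun cc =>
        if PySem.Set.contains s ((i : Int), cc.1) then "#" else cc.2) := by
  simp [pvApplyMask, PySem.List.getElem_enumerate]

theorem pvApplyMask_empty (g : List (List String)) :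
    pvApplyMask g PySem.Set.empty = g := by
  simp [pvApplyMask, PySem.List.map_snd_enumerate]

theorem pvApplyMask_headD_length (g : List (List String)) (s : PySem.Set (Int × Int)) :
    (((pvApplyMask g s).headD []).length : Int) = ((g.headD []).length : Int) := by
  cases g with
  | nil => simp [pvApplyMask]
  | cons r t => simp [pvApplyMask, PySem.List.enumerate_cons, PySem.List.length_enumerate]

theorem pvContains_add_of_ne {s : PySem.Set (Int × Int)} {x y : Int × Int} (h : x ≠ y) :
    PySem.Set.contains (PySem.Set.add s y) x = PySem.Set.contains s x := by
  rw [Bool.eq_iff_iff]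
  simp only [PySem.Set.contains_iff, PySem.Set.mem_add]
  exact ⟨fun hh => hh.resolve_right h, Or.inl⟩

theorem pvSetHash_applyMask (g : List (List String)) (s : PySem.Set (Int × Int))
    (r c : Int) (hr : 0 ≤ r) (hc : 0 ≤ c) :
    pvSetHash (pvApplyMask g s) r c = pvApplyMask g (PySem.Set.add s (r, c)) := by
  unfold pvSetHash
  apply List.ext_getElem
  · simp [pvApplyMask_length]
  · intro i h1 h2
    have hi : i < g.length := by simpa [pvApplyMask_length] using h2
    simp only [List.getElem_modify, pvApplyMask_getElem g s i hi,
      pvApplyMask_getElem g (PySem.Set.add s (r, c)) i hi]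
    by_cases hir : r.toNat = i
    · have hri : (i : Int) = r := by omega
      rw [if_pos hir]
      apply List.ext_getElem
      · simp [PySem.List.length_enumerate]
      · intro j hj1 hj2
        have hj : j < (g[i]'hi).length := by
          simpa [PySem.List.length_enumerate] using hj2
        simp only [List.getElem_set, List.getElem_map,
          PySem.List.getElem_enumerate, zero_add]
        by_cases hjc : c.toNat = j
        · have hcj : (j : Int) = c := by omega
          have hmem : PySem.Set.contains (PySem.Set.add s (r, c)) ((i : Int), (j : Int)) = true := by
            apply (PySem.Set.contains_iff _ _).mpr
            apply (PySem.Set.mem_add _ _ _).mpr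
            right; rw [hri, hcj]
          rw [if_pos hjc, hmem]
          simp
        · have hne : (((i : Int), (j : Int)) : Int × Int) ≠ (r, c) := by
            intro h
            have h2 := congrArg Prod.snd h
            simp only at h2
            omega
          rw [if_neg hjc, pvContains_add_of_ne hne]
    · have hneI : ∀ b : Int, (((i : Int), b) : Int × Int) ≠ (r, c) := by
        intro b h
        have h2 := congrArg Prod.fst h
        simp only at h2
        omega
      rw [if_neg hir]
      apply List.map_congr_left
      intro cc _
      rw [pvContains_add_of_ne (hneI cc.1)]

theorem pvMark_one (g : List (List String)) (s : PySem.Set (Int × Int)) (a b : Int) :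
    (if 0 ≤ a ∧ a < ((pvApplyMask g s).length : Int) ∧ 0 ≤ b ∧ b < (((pvApplyMask g s).headD []).length : Int)
      then pvSetHash (pvApplyMask g s) a b else pvApplyMask g s)
    = pvApplyMask g (if pvInb (g.length : Int) ((g.headD []).length : Int) (a, b) then PySem.Set.add s (a, b) else s) := by
  rw [pvApplyMask_length, pvApplyMask_headD_length]
  by_cases hc : 0 ≤ a ∧ a < (g.length : Int) ∧ 0 ≤ b ∧ b < ((g.headD []).length : Int)
  · have hb : pvInb (g.length : Int) ((g.headD []).length : Int) (a, b) = true := by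
      simp only [pvInb, Bool.and_eq_true, decide_eq_true_eq]
      exact ⟨⟨⟨hc.1, hc.2.1⟩, hc.2.2.1⟩, hc.2.2.2⟩
    rw [if_pos hc, hb, if_pos rfl]
    exact pvSetHash_applyMask g s a b hc.1 hc.2.2.1
  · have hb : ¬ (pvInb (g.length : Int) ((g.headD []).length : Int) (a, b) = true) := by
      simp only [pvInb, Bool.and_eq_true, decide_eq_true_eq]
      tauto
    rw [if_neg hc, if_neg hb]

theorem pvMark_step (g : List (List String)) (s : PySem.Set (Int × Int))
    (e : (Int × Int) × (Int × Int) × (Int × Int)) :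
    pvMarkA (pvApplyMask g s) e =
      pvApplyMask g
        ([((e.1.1 - e.2.2.1 : Int), (e.1.2 - e.2.2.2 : Int)), (e.2.1.1 + e.2.2.1, e.2.1.2 + e.2.2.2)].foldl
          (fun s p => if pvInb (g.length : Int) ((g.headD []).length : Int) p then PySem.Set.add s p else s) s) := by
  simp only [List.foldl_cons, List.foldl_nil]
  simp only [pvMarkA]
  rw [pvMark_one g s (e.1.1 - e.2.2.1) (e.1.2 - e.2.2.2),
    pvMark_one g _ (e.2.1.1 + e.2.2.1) (e.2.1.2 + e.2.2.2)]

theorem pvMark_fold (g : List (List String)) (lst : List ((Int × Int) × (Int × Int) × (Int × Int)))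
    (s : PySem.Set (Int × Int)) :
    lst.foldl pvMarkA (pvApplyMask g s) =
      pvApplyMask g
        (lst.foldl (fun s e =>
          [((e.1.1 - e.2.2.1 : Int), (e.1.2 - e.2.2.2 : Int)), (e.2.1.1 + e.2.2.1, e.2.1.2 + e.2.2.2)].foldl
            (fun s p => if pvInb (g.length : Int) ((g.headD []).length : Int) p then PySem.Set.add s p else s) s) s) := by
  induction lst generalizing s with
  | nil => rfl
  | cons e t ih => simp only [List.foldl_cons, pvMark_step, ih]

theorem pvMark_fold_outer (g : List (List String))
    (distances : List (String × List ((Int × Int) × (Int × Int) × (Int × Int))))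
    (s : PySem.Set (Int × Int)) :
    distances.foldl (fun gg kv => kv.2.foldl pvMarkA gg) (pvApplyMask g s) =
      pvApplyMask g
        (distances.foldl (fun s kv => kv.2.foldl (fun s e =>
          [((e.1.1 - e.2.2.1 : Int), (e.1.2 - e.2.2.2 : Int)), (e.2.1.1 + e.2.2.1, e.2.1.2 + e.2.2.2)].foldl
            (fun s p => if pvInb (g.length : Int) ((g.headD []).length : Int) p then PySem.Set.add s p else s) s) s) s) := by
  induction distances generalizing s with
  | nil => rfl
  | cons kv t ih => simp only [List.foldl_cons, pvMark_fold, ih]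

theorem pvCount_eq (g : List (List String)) (z : Int) :
    g.foldl (fun acc row => row.foldl (fun a cell => if cell == "#" then a + 1 else a) acc) z =
      g.foldl (fun s row => s + (PySem.List.count row "#" : Int)) z := by
  induction g generalizing z with
  | nil => rfl
  | cons row t ih => simp only [List.foldl_cons, PySem.List.foldl_beq_add_one, PySem.List.count]

-- ===== VERDICT (by name: the statement is the Claim_ definition above) =====
theorem modify_grid_with_hashes_spec : Claim_equal_modify_grid_with_hashes := by
  intro grid distances _ _
  unfold Spec_modify_grid_with_hashes modify_grid_with_hashes modify_grid_with_hashes_alt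
  have hg : distances.foldl (fun g kv => kv.2.foldl pvMarkA g) grid =
      pvApplyMask grid (pvTargets (grid.length : Int) ((grid.headD []).length : Int) distances) := by
    conv_lhs => rw [← pvApplyMask_empty grid]
    exact pvMark_fold_outer grid distances PySem.Set.empty
  simp only [hg, pvCount_eq]
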